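-- pv_equiv track=rewrite | github.com/ecanbaykurt/SunnyModels | open_model_datalake.py | list_filetypes
-- ===== SOURCE A (Python) =====
-- from typing import Dict, List, Tuple, Any
--
-- FILETYPE_PATTERNS = {
--     "excel": [".xlsx", ".xls"],
--     "csv": [".csv"],
--     "json": [".jsonl", ".json"],
--     "parquet": [".parquet"],
--     "html": [".html", ".htm"],
--     "markdown": [".md"],
--     "text": [".txt"],
--     "ts": [".ts", ".tsx"],
--     "python": [".py"],
--     "sql": [".sql"]
-- }
--
-- def list_filetypes(files: List[str]) -> List[str]:
--     found = set()
--     for f in files: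
--         lf = f.lower()
--         for ftype, exts in FILETYPE_PATTERNS.items():
--             if any(lf.endswith(ext) for ext in exts):
--                 found.add(ftype)
--     return sorted(found)
-- ===== SOURCE B (Python) =====
-- from typing import List
--
-- FILETYPE_PATTERNS = {
--     "excel": [".xlsx", ".xls"],
--     "csv": [".csv"],
--     "json": [".jsonl", ".json"],
--     "parquet": [".parquet"],
--     "html": [".html", ".htm"],
--     "markdown": [".md"],
--     "text": [".txt"],
--     "ts": [".ts", ".tsx"],
--     "python": [".py"],
--     "sql": [".sql"]
-- }
--
-- EXT_TO_TYPE = {ext: ftype for ftype, exts in FILETYPE_PATTERNS.items() for ext in exts}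
--
-- def list_filetypes(files: List[str]) -> List[str]:
--     found = set()
--     for f in files:
--         lf = f.lower()
--         _, dot, rest = lf.rpartition('.')
--         if dot:
--             ftype = EXT_TO_TYPE.get('.' + rest)
--             if ftype is not None:
--                 found.add(ftype)
--     return sorted(found)
-- ===== Notes on version B (the rewrite author's own statement) =====
-- stated objective: faster
-- what changed: B pre-flattens FILETYPE_PATTERNS into one extension-to-type dict and, per file, extracts the last-dot suffix with rpartition and does a single lookup, eliminating A's inner scan over all pattern lists with repeated endswith tests.
import Mathlib
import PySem

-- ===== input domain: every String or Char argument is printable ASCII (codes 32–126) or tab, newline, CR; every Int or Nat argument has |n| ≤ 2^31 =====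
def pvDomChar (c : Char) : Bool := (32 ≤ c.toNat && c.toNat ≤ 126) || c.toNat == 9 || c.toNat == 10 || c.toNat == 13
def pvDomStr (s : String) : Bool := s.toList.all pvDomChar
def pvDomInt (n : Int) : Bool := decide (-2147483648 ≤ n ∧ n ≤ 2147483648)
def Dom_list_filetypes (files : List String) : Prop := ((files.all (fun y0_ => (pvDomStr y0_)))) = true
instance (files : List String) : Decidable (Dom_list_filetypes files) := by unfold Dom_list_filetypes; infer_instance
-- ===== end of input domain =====

-- B replaces A's per-file scan over all pattern lists (repeated endswith tests) by a single
-- lookup of the file's last-dot suffix in a pre-flattened extension→type dict; return values agree.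

-- ===== PORT A =====
def pvPatterns : List (String × List String) :=
  [("excel", [".xlsx", ".xls"]), ("csv", [".csv"]), ("json", [".jsonl", ".json"]),
   ("parquet", [".parquet"]), ("html", [".html", ".htm"]), ("markdown", [".md"]),
   ("text", [".txt"]), ("ts", [".ts", ".tsx"]), ("python", [".py"]), ("sql", [".sql"])]

-- one iteration of A's outer loop (body of 'for f in files')
def pvStepA (found : PySem.Set String) (f : String) : PySem.Set String :=
  let lf := PySem.Str.lower f
  pvPatterns.foldl (fun acc p =>
    if p.2.any (fun ext => PySem.Str.endswith lf ext) then PySem.Set.add acc p.1 else acc) found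

def list_filetypes (files : List String) : List String :=
  PySem.List.sorted (files.foldl pvStepA PySem.Set.empty) (fun x => x) false

-- ===== PORT B =====
-- EXT_TO_TYPE: FILETYPE_PATTERNS flattened into one extension→type dict (value written out)
def pvExtToType : PySem.Dict String String :=
  ⟨[(".xlsx", "excel"), (".xls", "excel"), (".csv", "csv"), (".jsonl", "json"), (".json", "json"),
    (".parquet", "parquet"), (".html", "html"), (".htm", "html"), (".md", "markdown"),
    (".txt", "text"), (".ts", "ts"), (".tsx", "ts"), (".py", "python"), (".sql", "sql")]⟩

-- lf.rpartition('.')[1:3], hand-ported on the char list (exact: returns the chars after the LAST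
-- '.', or none when lf has no '.' — exactly when Python's middle component 'dot' is empty)
def pvLastDotSuffix (cs : List Char) : Option (List Char) :=
  if '.' ∈ cs then some ((cs.reverse.takeWhile (fun c => c ≠ '.')).reverse) else none

-- one iteration of B's loop
def pvStepB (found : PySem.Set String) (f : String) : PySem.Set String :=
  let lf := PySem.Str.lower f
  match pvLastDotSuffix lf.toList with
  | none => found
  | some rest =>
    match PySem.Dict.get? pvExtToType (String.ofList ('.' :: rest)) with
    | some ftype => PySem.Set.add found ftype
    | none => found

def list_filetypes_alt (files : List String) : List String :=
  PySem.List.sorted (files.foldl pvStepB PySem.Set.empty) (fun x => x) false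

-- ===== PRECONDITION & SPEC =====
def Spec_list_filetypes (files : List String) (out : List String) : Prop := out = list_filetypes_alt files
instance (files : List String) (out : List String) : Decidable (Spec_list_filetypes files out) := by unfold Spec_list_filetypes; infer_instance

-- ===== CLAIM (what is proved, stated in full; the proofs are below) =====
def Claim_equal_list_filetypes : Prop := ∀ (files : List String), Dom_list_filetypes files → Spec_list_filetypes files (list_filetypes files)

-- ===== LEMMAS AND PROOFS =====

theorem pv_takeWhile_append (p : Char → Bool) (l₁ l₂ : List Char) (h : ∀ x ∈ l₁, p x) :
    (l₁ ++ l₂).takeWhile p = l₁ ++ l₂.takeWhile p := by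
  induction l₁ with
  | nil => simp
  | cons a t ih =>
    have ha : p a = true := h a (by simp)
    simp [ha, ih (fun x hx => h x (by simp [hx]))]

theorem pv_dropWhile_head_false (p : Char → Bool) (l : List Char) (c : Char) (d : List Char)
    (h : l.dropWhile p = c :: d) : p c = false := by
  induction l with
  | nil => simp at h
  | cons a t ih =>
    rw [List.dropWhile_cons] at h
    by_cases hp : p a
    · exact ih (by simpa [hp] using h)
    · simp [hp] at h
      simp [← h.1, hp]

-- the central characterisation: a string ends with '.'++w (w dot-free) iff w is exactly
-- what follows its last dot
theorem pv_suffix_iff_lds (cs w : List Char) (hw : '.' ∉ w) :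
    ('.' :: w) <:+ cs ↔ pvLastDotSuffix cs = some w := by
  constructor
  · rintro ⟨pre, rfl⟩
    have hmem : '.' ∈ pre ++ '.' :: w := by simp
    unfold pvLastDotSuffix
    rw [if_pos hmem]
    have hrev : (pre ++ '.' :: w).reverse = w.reverse ++ '.' :: pre.reverse := by
      simp [List.reverse_append]
    rw [hrev, pv_takeWhile_append _ _ _ (fun x hx => by
      simp only [List.mem_reverse] at hx
      simp only [decide_eq_true_eq, ne_eq]
      intro hc; exact hw (hc ▸ hx))]
    simp
  · intro h
    unfold pvLastDotSuffix at h
    split at h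
    case isTrue hmem =>
      injection h with h
      set r := cs.reverse with hr
      have hsplit : r.takeWhile (fun c => c ≠ '.') ++ r.dropWhile (fun c => c ≠ '.') = r :=
        List.takeWhile_append_dropWhile
      have hmemr : '.' ∈ r := by rw [hr, List.mem_reverse]; exact hmem
      have hnil : r.dropWhile (fun c => c ≠ '.') ≠ [] := by
        intro hd
        rw [hd, List.append_nil] at hsplit
        rw [← hsplit] at hmemr
        have := List.mem_takeWhile_imp hmemr
        simp at this
      cases hd : r.dropWhile (fun c => c ≠ '.') with
      | nil => exact absurd hd hnil
      | cons c d =>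
        have hc : c = '.' := by
          have := pv_dropWhile_head_false _ _ _ _ hd
          simpa using this
        have hr2 : r = r.takeWhile (fun c => c ≠ '.') ++ c :: d := by
          rw [← hd, hsplit]
        have hcs : cs = d.reverse ++ c :: (r.takeWhile (fun c => c ≠ '.')).reverse := by
          have h0 : cs = r.reverse := by rw [hr, List.reverse_reverse]
          rw [h0, congrArg List.reverse hr2]
          simp
        rw [hc] at hcs
        rw [hcs, ← h]
        exact ⟨d.reverse, rfl⟩
    case isFalse => exact absurd h (by simp)

theorem pv_endswith_iff (cs v : List Char) (hv : '.' ∉ v) :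
    PySem.Chars.endswith cs ('.' :: v) = true ↔ pvLastDotSuffix cs = some v := by
  rw [PySem.Chars.endswith_iff, pv_suffix_iff_lds _ _ hv]

theorem pv_endswith_false (cs v : List Char) (hv : '.' ∉ v)
    (h : pvLastDotSuffix cs = none) :
    PySem.Chars.endswith cs ('.' :: v) = false := by
  rw [Bool.eq_false_iff]
  intro hb
  rw [(pv_endswith_iff cs v hv).mp hb] at h
  cases h

theorem pv_endswith_decide (cs v w : List Char) (hv : '.' ∉ v)
    (h : pvLastDotSuffix cs = some w) :
    PySem.Chars.endswith cs ('.' :: v) = decide (w = v) := by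
  by_cases hq : w = v
  · subst hq
    have hd : decide (w = w) = true := by simp
    rw [hd]
    exact (pv_endswith_iff cs w hv).mpr h
  · have hd : decide (w = v) = false := by simp [hq]
    rw [hd, Bool.eq_false_iff]
    intro hb
    have hx := (pv_endswith_iff cs v hv).mp hb
    rw [h] at hx
    exact hq (Option.some_inj.mp hx)

theorem pv_key_ne (ext : String) (v w : List Char) (he : ext.toList = '.' :: v) (hq : w ≠ v) :
    (ext == String.ofList ('.' :: w)) = false := by
  rw [beq_eq_false_iff_ne]
  intro hc
  apply hq
  have h2 := congrArg String.toList hc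
  rw [String.toList_ofList, he] at h2
  injection h2 with h3 h4
  exact h4.symm

theorem pv_step_eq (found : PySem.Set String) (f : String) : pvStepA found f = pvStepB found f := by
  simp only [pvStepA, pvStepB]
  set lf := PySem.Str.lower f with hlf
  cases h : pvLastDotSuffix lf.toList with
  | none =>
    have e1 : PySem.Chars.endswith lf.toList ('.' :: ['x', 'l', 's', 'x']) = false := pv_endswith_false lf.toList ['x', 'l', 's', 'x'] (by decide) h
    have e2 : PySem.Chars.endswith lf.toList ('.' :: ['x', 'l', 's']) = false := pv_endswith_false lf.toList ['x', 'l', 's'] (by decide) h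
    have e3 : PySem.Chars.endswith lf.toList ('.' :: ['c', 's', 'v']) = false := pv_endswith_false lf.toList ['c', 's', 'v'] (by decide) h
    have e4 : PySem.Chars.endswith lf.toList ('.' :: ['j', 's', 'o', 'n', 'l']) = false := pv_endswith_false lf.toList ['j', 's', 'o', 'n', 'l'] (by decide) h
    have e5 : PySem.Chars.endswith lf.toList ('.' :: ['j', 's', 'o', 'n']) = false := pv_endswith_false lf.toList ['j', 's', 'o', 'n'] (by decide) h
    have e6 : PySem.Chars.endswith lf.toList ('.' :: ['p', 'a', 'r', 'q', 'u', 'e', 't']) = false := pv_endswith_false lf.toList ['p', 'a', 'r', 'q', 'u', 'e', 't'] (by decide) h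
    have e7 : PySem.Chars.endswith lf.toList ('.' :: ['h', 't', 'm', 'l']) = false := pv_endswith_false lf.toList ['h', 't', 'm', 'l'] (by decide) h
    have e8 : PySem.Chars.endswith lf.toList ('.' :: ['h', 't', 'm']) = false := pv_endswith_false lf.toList ['h', 't', 'm'] (by decide) h
    have e9 : PySem.Chars.endswith lf.toList ('.' :: ['m', 'd']) = false := pv_endswith_false lf.toList ['m', 'd'] (by decide) h
    have e10 : PySem.Chars.endswith lf.toList ('.' :: ['t', 'x', 't']) = false := pv_endswith_false lf.toList ['t', 'x', 't'] (by decide) h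
    have e11 : PySem.Chars.endswith lf.toList ('.' :: ['t', 's']) = false := pv_endswith_false lf.toList ['t', 's'] (by decide) h
    have e12 : PySem.Chars.endswith lf.toList ('.' :: ['t', 's', 'x']) = false := pv_endswith_false lf.toList ['t', 's', 'x'] (by decide) h
    have e13 : PySem.Chars.endswith lf.toList ('.' :: ['p', 'y']) = false := pv_endswith_false lf.toList ['p', 'y'] (by decide) h
    have e14 : PySem.Chars.endswith lf.toList ('.' :: ['s', 'q', 'l']) = false := pv_endswith_false lf.toList ['s', 'q', 'l'] (by decide) h
    simp [pvPatterns, PySem.Str.endswith_eq, e1, e2, e3, e4, e5, e6, e7, e8, e9, e10, e11, e12, e13, e14]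
  | some w =>
    have e1 : PySem.Chars.endswith lf.toList ('.' :: ['x', 'l', 's', 'x']) = decide (w = ['x', 'l', 's', 'x']) := pv_endswith_decide lf.toList ['x', 'l', 's', 'x'] w (by decide) h
    have e2 : PySem.Chars.endswith lf.toList ('.' :: ['x', 'l', 's']) = decide (w = ['x', 'l', 's']) := pv_endswith_decide lf.toList ['x', 'l', 's'] w (by decide) h
    have e3 : PySem.Chars.endswith lf.toList ('.' :: ['c', 's', 'v']) = decide (w = ['c', 's', 'v']) := pv_endswith_decide lf.toList ['c', 's', 'v'] w (by decide) h
    have e4 : PySem.Chars.endswith lf.toList ('.' :: ['j', 's', 'o', 'n', 'l']) = decide (w = ['j', 's', 'o', 'n', 'l']) := pv_endswith_decide lf.toList ['j', 's', 'o', 'n', 'l'] w (by decide) h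
    have e5 : PySem.Chars.endswith lf.toList ('.' :: ['j', 's', 'o', 'n']) = decide (w = ['j', 's', 'o', 'n']) := pv_endswith_decide lf.toList ['j', 's', 'o', 'n'] w (by decide) h
    have e6 : PySem.Chars.endswith lf.toList ('.' :: ['p', 'a', 'r', 'q', 'u', 'e', 't']) = decide (w = ['p', 'a', 'r', 'q', 'u', 'e', 't']) := pv_endswith_decide lf.toList ['p', 'a', 'r', 'q', 'u', 'e', 't'] w (by decide) h
    have e7 : PySem.Chars.endswith lf.toList ('.' :: ['h', 't', 'm', 'l']) = decide (w = ['h', 't', 'm', 'l']) := pv_endswith_decide lf.toList ['h', 't', 'm', 'l'] w (by decide) h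
    have e8 : PySem.Chars.endswith lf.toList ('.' :: ['h', 't', 'm']) = decide (w = ['h', 't', 'm']) := pv_endswith_decide lf.toList ['h', 't', 'm'] w (by decide) h
    have e9 : PySem.Chars.endswith lf.toList ('.' :: ['m', 'd']) = decide (w = ['m', 'd']) := pv_endswith_decide lf.toList ['m', 'd'] w (by decide) h
    have e10 : PySem.Chars.endswith lf.toList ('.' :: ['t', 'x', 't']) = decide (w = ['t', 'x', 't']) := pv_endswith_decide lf.toList ['t', 'x', 't'] w (by decide) h
    have e11 : PySem.Chars.endswith lf.toList ('.' :: ['t', 's']) = decide (w = ['t', 's']) := pv_endswith_decide lf.toList ['t', 's'] w (by decide) h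
    have e12 : PySem.Chars.endswith lf.toList ('.' :: ['t', 's', 'x']) = decide (w = ['t', 's', 'x']) := pv_endswith_decide lf.toList ['t', 's', 'x'] w (by decide) h
    have e13 : PySem.Chars.endswith lf.toList ('.' :: ['p', 'y']) = decide (w = ['p', 'y']) := pv_endswith_decide lf.toList ['p', 'y'] w (by decide) h
    have e14 : PySem.Chars.endswith lf.toList ('.' :: ['s', 'q', 'l']) = decide (w = ['s', 'q', 'l']) := pv_endswith_decide lf.toList ['s', 'q', 'l'] w (by decide) h
    simp [pvPatterns, PySem.Str.endswith_eq, e1, e2, e3, e4, e5, e6, e7, e8, e9, e10, e11, e12, e13, e14]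
    by_cases q1 : w = ['x', 'l', 's', 'x']
    · subst q1; rfl
    by_cases q2 : w = ['x', 'l', 's']
    · subst q2; rfl
    by_cases q3 : w = ['c', 's', 'v']
    · subst q3; rfl
    by_cases q4 : w = ['j', 's', 'o', 'n', 'l']
    · subst q4; rfl
    by_cases q5 : w = ['j', 's', 'o', 'n']
    · subst q5; rfl
    by_cases q6 : w = ['p', 'a', 'r', 'q', 'u', 'e', 't']
    · subst q6; rfl
    by_cases q7 : w = ['h', 't', 'm', 'l']
    · subst q7; rfl
    by_cases q8 : w = ['h', 't', 'm']
    · subst q8; rfl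
    by_cases q9 : w = ['m', 'd']
    · subst q9; rfl
    by_cases q10 : w = ['t', 'x', 't']
    · subst q10; rfl
    by_cases q11 : w = ['t', 's']
    · subst q11; rfl
    by_cases q12 : w = ['t', 's', 'x']
    · subst q12; rfl
    by_cases q13 : w = ['p', 'y']
    · subst q13; rfl
    by_cases q14 : w = ['s', 'q', 'l']
    · subst q14; rfl
    have k1 : ((".xlsx" : String) == String.ofList ('.' :: w)) = false := pv_key_ne ".xlsx" ['x', 'l', 's', 'x'] w rfl q1
    have k2 : ((".xls" : String) == String.ofList ('.' :: w)) = false := pv_key_ne ".xls" ['x', 'l', 's'] w rfl q2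
    have k3 : ((".csv" : String) == String.ofList ('.' :: w)) = false := pv_key_ne ".csv" ['c', 's', 'v'] w rfl q3
    have k4 : ((".jsonl" : String) == String.ofList ('.' :: w)) = false := pv_key_ne ".jsonl" ['j', 's', 'o', 'n', 'l'] w rfl q4
    have k5 : ((".json" : String) == String.ofList ('.' :: w)) = false := pv_key_ne ".json" ['j', 's', 'o', 'n'] w rfl q5
    have k6 : ((".parquet" : String) == String.ofList ('.' :: w)) = false := pv_key_ne ".parquet" ['p', 'a', 'r', 'q', 'u', 'e', 't'] w rfl q6
    have k7 : ((".html" : String) == String.ofList ('.' :: w)) = false := pv_key_ne ".html" ['h', 't', 'm', 'l'] w rfl q7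
    have k8 : ((".htm" : String) == String.ofList ('.' :: w)) = false := pv_key_ne ".htm" ['h', 't', 'm'] w rfl q8
    have k9 : ((".md" : String) == String.ofList ('.' :: w)) = false := pv_key_ne ".md" ['m', 'd'] w rfl q9
    have k10 : ((".txt" : String) == String.ofList ('.' :: w)) = false := pv_key_ne ".txt" ['t', 'x', 't'] w rfl q10
    have k11 : ((".ts" : String) == String.ofList ('.' :: w)) = false := pv_key_ne ".ts" ['t', 's'] w rfl q11
    have k12 : ((".tsx" : String) == String.ofList ('.' :: w)) = false := pv_key_ne ".tsx" ['t', 's', 'x'] w rfl q12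
    have k13 : ((".py" : String) == String.ofList ('.' :: w)) = false := pv_key_ne ".py" ['p', 'y'] w rfl q13
    have k14 : ((".sql" : String) == String.ofList ('.' :: w)) = false := pv_key_ne ".sql" ['s', 'q', 'l'] w rfl q14
    simp [PySem.Dict.get?, pvExtToType, List.find?, q1, q2, q3, q4, q5, q6, q7, q8, q9, q10,
      q11, q12, q13, q14, k1, k2, k3, k4, k5, k6, k7, k8, k9, k10, k11, k12, k13, k14]

-- ===== VERDICT (by name: the statement is the Claim_ definition above) =====
theorem list_filetypes_spec : Claim_equal_list_filetypes := by
  intro files _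
  unfold Spec_list_filetypes list_filetypes list_filetypes_alt
  have hstep : pvStepA = pvStepB := funext fun a => funext fun b => pv_step_eq a b
  rw [hstep]
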